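-- pv_equiv track=rewrite | github.com/nPoKhappy/Using-python-for-CPE | CPE49/uva11063.py | b_two
-- ===== SOURCE A (Python) =====
-- def b_two(a : list[int]):
-- 	n : int = len(a)
-- 	nums = []
-- 	for i in range(n - 1):
-- 		for j in range(i, n):
-- 			sum : int = a[i] + a[j]
-- 			if (sum not in nums):
-- 				nums.append(sum)
-- 			else:
-- 				return False
-- 	return True
-- ===== SOURCE B (Python) =====
-- def b_two(a: list[int]):
--     n = len(a)
--     sums = sorted(a[i] + a[j] for i in range(n - 1) for j in range(i, n))
--     return all(x != y for x, y in zip(sums, sums[1:]))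
-- ===== Notes on version B (the rewrite author's own statement) =====
-- stated objective: simpler
-- what changed: Replaces the per-pair linear membership scan with early return by building all pairwise sums, sorting them, and checking adjacent sorted elements for a duplicate.
import Mathlib
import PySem

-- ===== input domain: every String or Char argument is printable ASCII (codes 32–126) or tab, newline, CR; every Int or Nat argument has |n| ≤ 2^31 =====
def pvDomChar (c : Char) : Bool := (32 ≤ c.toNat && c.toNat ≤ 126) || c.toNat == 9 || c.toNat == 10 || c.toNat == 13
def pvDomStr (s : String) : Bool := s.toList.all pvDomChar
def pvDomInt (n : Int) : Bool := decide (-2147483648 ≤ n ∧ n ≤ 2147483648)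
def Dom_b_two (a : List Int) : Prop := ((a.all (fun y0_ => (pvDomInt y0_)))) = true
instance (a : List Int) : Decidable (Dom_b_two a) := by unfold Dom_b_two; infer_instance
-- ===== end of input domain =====

-- B replaces A's per-pair membership scan (with early return) by sort-then-adjacent-scan
-- duplicate detection over the same list of pairwise sums: simpler, no quadratic inner scan.

-- ===== PORT A =====
-- inner 'for j in range(i, n)' loop: some nums' = loop finished, none = 'return False'
def b_twoJ (a : List Int) (i : Int) (js : List Int) (nums : List Int) : Option (List Int) :=
  match js with
  | [] => some nums
  | j :: rest =>
    let s := PySem.List.pyGetD a i 0 + PySem.List.pyGetD a j 0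
    if s ∈ nums then none
    else b_twoJ a i rest (nums ++ [s])

-- outer 'for i in range(n - 1)' loop
def b_twoI (a : List Int) (iList : List Int) (nums : List Int) : Bool :=
  match iList with
  | [] => true
  | i :: rest =>
    match b_twoJ a i (PySem.List.pyRange i (a.length : Int) 1) nums with
    | none => false
    | some nums' => b_twoI a rest nums'

def b_two (a : List Int) : Bool :=
  b_twoI a (PySem.List.pyRange 0 ((a.length : Int) - 1) 1) []

-- ===== PORT B =====
-- the generator 'a[i] + a[j] for i in range(n-1) for j in range(i, n)'
def pvSums (a : List Int) : List Int :=
  (PySem.List.pyRange 0 ((a.length : Int) - 1) 1).flatMap (fun i =>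
    (PySem.List.pyRange i (a.length : Int) 1).map (fun j =>
      PySem.List.pyGetD a i 0 + PySem.List.pyGetD a j 0))

-- sums[1:] on a list is exactly dropping the first element
def b_two_alt (a : List Int) : Bool :=
  let sums := PySem.List.sorted (pvSums a) (fun x => x) false
  (sums.zip (sums.drop 1)).all (fun p => p.1 != p.2)

-- ===== PRECONDITION & SPEC =====
def Spec_b_two (a : List Int) (out : Bool) : Prop := out = b_two_alt a
instance (a : List Int) (out : Bool) : Decidable (Spec_b_two a out) := by unfold Spec_b_two; infer_instance

-- ===== CLAIM (what is proved, stated in full; the proofs are below) =====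
def Claim_equal_b_two : Prop := ∀ (a : List Int), Dom_b_two a → Spec_b_two a (b_two a)

-- ===== LEMMAS AND PROOFS =====

-- A's inner loop succeeds iff appending this row of sums keeps the seen list duplicate-free
theorem b_twoJ_eq (a : List Int) (i : Int) (js : List Int) :
    ∀ (nums : List Int), nums.Nodup →
      b_twoJ a i js nums =
        if (nums ++ js.map (fun j => PySem.List.pyGetD a i 0 + PySem.List.pyGetD a j 0)).Nodup
        then some (nums ++ js.map (fun j => PySem.List.pyGetD a i 0 + PySem.List.pyGetD a j 0))
        else none := by
  induction js with
  | nil => intro nums h; simp [b_twoJ, h]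
  | cons j rest ih =>
    intro nums h
    by_cases hs : (PySem.List.pyGetD a i 0 + PySem.List.pyGetD a j 0) ∈ nums
    · rw [b_twoJ]
      simp only [hs, if_true]
      rw [if_neg]
      intro hnd
      rw [List.nodup_append] at hnd
      exact hnd.2.2 _ hs _ (by simp) rfl
    · rw [b_twoJ]
      simp only [hs, if_false]
      rw [ih (nums ++ [PySem.List.pyGetD a i 0 + PySem.List.pyGetD a j 0])
        (by
          refine List.Nodup.append h (by simp) ?_
          intro z hz hz1
          simp at hz1
          exact hs (hz1 ▸ hz))]
      simp [List.append_assoc]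

-- A's outer loop is duplicate-freedom of seen-so-far plus all remaining rows
theorem b_twoI_eq (a : List Int) (iList : List Int) :
    ∀ (nums : List Int), nums.Nodup →
      b_twoI a iList nums =
        decide ((nums ++ iList.flatMap (fun i =>
          (PySem.List.pyRange i (a.length : Int) 1).map (fun j =>
            PySem.List.pyGetD a i 0 + PySem.List.pyGetD a j 0))).Nodup) := by
  induction iList with
  | nil => intro nums h; simp [b_twoI, h]
  | cons i rest ih =>
    intro nums h
    rw [b_twoI, b_twoJ_eq a i _ nums h]
    by_cases hnd : (nums ++ (PySem.List.pyRange i (a.length : Int) 1).map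
        (fun j => PySem.List.pyGetD a i 0 + PySem.List.pyGetD a j 0)).Nodup
    · rw [if_pos hnd]
      show b_twoI a rest _ = _
      rw [ih _ hnd]
      simp [List.append_assoc]
    · rw [if_neg hnd]
      show false = _
      have hno : ¬ (nums ++ ((PySem.List.pyRange i (a.length : Int) 1).map (fun j =>
            PySem.List.pyGetD a i 0 + PySem.List.pyGetD a j 0) ++ rest.flatMap (fun i =>
          (PySem.List.pyRange i (a.length : Int) 1).map (fun j =>
            PySem.List.pyGetD a i 0 + PySem.List.pyGetD a j 0)))).Nodup := by
        intro hbig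
        apply hnd
        rw [← List.append_assoc] at hbig
        exact List.Nodup.sublist (List.sublist_append_left _ _) hbig
      simp [hno]

theorem b_two_eq_nodup (a : List Int) : b_two a = decide (pvSums a).Nodup := by
  rw [b_two, b_twoI_eq a _ [] List.nodup_nil, pvSums]
  simp

-- adjacent-distinct on a ≤-sorted list is exactly Nodup
theorem adj_all_eq_nodup :
    ∀ (l : List Int), l.Pairwise (· ≤ ·) →
      ((l.zip (l.drop 1)).all (fun p => p.1 != p.2)) = decide l.Nodup := by
  intro l
  induction l with
  | nil => intro _; simp
  | cons x t ih =>
    intro hp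
    cases t with
    | nil => simp
    | cons y t' =>
      have hp' : (y :: t').Pairwise (· ≤ ·) := hp.tail
      have hxy : x ≤ y := (List.pairwise_cons.mp hp).1 y (by simp)
      have hyt : ∀ z ∈ t', y ≤ z := fun z hz =>
        (List.pairwise_cons.mp hp').1 z hz
      have key : ((x ≠ y) ∧ (y :: t').Nodup) ↔ (x :: y :: t').Nodup := by
        constructor
        · rintro ⟨hne, hnd⟩
          refine List.nodup_cons.mpr ⟨?_, hnd⟩
          intro hmem
          rcases List.mem_cons.mp hmem with h | h
          · exact hne h
          · exact hne (le_antisymm hxy (hyt x h))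
        · intro h
          refine ⟨?_, (List.nodup_cons.mp h).2⟩
          intro he
          exact (List.nodup_cons.mp h).1 (by simp [he])
      have hb : (x != y) = decide (x ≠ y) := by
        by_cases h : x = y <;> simp [h]
      simp only [List.drop_one, List.tail_cons, List.zip_cons_cons, List.all_cons]
      rw [show (y :: t').zip t' = (y :: t').zip ((y :: t').drop 1) by simp,
        ih hp', hb, ← Bool.decide_and]
      exact decide_eq_decide.mpr key

theorem sorted_nodup_iff (a : List Int) :
    (PySem.List.sorted (pvSums a) (fun x => x) false).Nodup ↔ (pvSums a).Nodup :=
  (PySem.List.sorted_perm (pvSums a) (fun x => x) false).nodup_iff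

-- ===== VERDICT (by name: the statement is the Claim_ definition above) =====
theorem b_two_spec : Claim_equal_b_two := by
  intro a _
  unfold Spec_b_two
  rw [b_two_eq_nodup, b_two_alt]
  rw [adj_all_eq_nodup _ (by simpa using PySem.List.sorted_pairwise (pvSums a) (fun x => x))]
  simp [sorted_nodup_iff]
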